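-- pv_equiv track=rewrite | github.com/rudi193-cmd/willow-1.5 | hooks/memory-to-db.py | _extract_memory_meta
-- ===== SOURCE A (Python) =====
-- def _extract_memory_meta(content):
--     """Extract name, type, description from frontmatter if present."""
--     meta = {"name": "", "type": "project", "description": ""}
--     if content.startswith("---"):
--         parts = content.split("---", 2)
--         if len(parts) >= 3:
--             for line in parts[1].strip().split("\n"):
--                 if ":" in line:
--                     key, val = line.split(":", 1)
--                     key = key.strip().lower()
--                     val = val.strip()
--                     if key in meta:
--                         meta[key] = val
--     return meta
-- ===== SOURCE B (Python) =====
-- def _extract_memory_meta(content):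
--     """Extract name, type, description from frontmatter if present."""
--     defaults = (("name", ""), ("type", "project"), ("description", ""))
--     header = None
--     if content.startswith("---"):
--         parts = content.split("---", 2)
--         if len(parts) >= 3:
--             header = parts[1].strip().split("\n")
--     if header is None:
--         return dict(defaults)
--
--     def lookup(key, default):
--         for line in reversed(header):
--             k, sep, v = line.partition(":")
--             if sep and k.strip().lower() == key:
--                 return v.strip()
--         return default
--
--     return {key: lookup(key, default) for key, default in defaults}
-- ===== Notes on version B (the rewrite author's own statement) =====
-- stated objective: alternative
-- what changed: Instead of A's single forward pass that mutates a defaults dict line by line, B parses the header once and then, for each of the three known keys, does an independent backwards linear search over the header lines for the last line with that key (last occurrence wins by construction), falling back to the default; no running dict of results is maintained.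
import Mathlib
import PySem

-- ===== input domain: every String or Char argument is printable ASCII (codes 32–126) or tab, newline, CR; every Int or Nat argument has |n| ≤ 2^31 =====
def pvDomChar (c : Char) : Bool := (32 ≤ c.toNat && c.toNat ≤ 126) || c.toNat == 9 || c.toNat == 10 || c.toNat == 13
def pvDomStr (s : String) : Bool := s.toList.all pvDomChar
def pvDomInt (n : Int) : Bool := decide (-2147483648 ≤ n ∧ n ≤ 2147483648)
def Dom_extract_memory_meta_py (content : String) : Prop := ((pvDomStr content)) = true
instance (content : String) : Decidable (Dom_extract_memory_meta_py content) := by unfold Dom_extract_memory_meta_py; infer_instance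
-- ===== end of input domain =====

-- B replaces A's forward line loop mutating a defaults dict with an independent backwards
-- last-occurrence search of the header per known key (objective: alternative; same values).

-- ===== PORT A =====
def extract_memory_meta_py (content : String) : List (String × String) :=
  let md : PySem.Dict String String :=
    PySem.Dict.ofList [("name", ""), ("type", "project"), ("description", "")]
  let md :=
    if PySem.Str.startswith content "---" then
      match PySem.Str.splitMax? content "---" 2 with   -- sep ≠ "" so never none
      | some parts =>
        if 3 ≤ parts.length then
          match PySem.Str.split? (PySem.Str.strip (PySem.List.pyGetD parts 1 "")) "\n" with
          | some lines =>
            lines.foldl (fun m line =>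
              if PySem.Str.isIn ":" line then
                match PySem.Str.splitMax? line ":" 1 with   -- ':' in line ⇒ exactly two pieces
                | some [k, v] =>
                  let key := PySem.Str.lower (PySem.Str.strip k)
                  let val := PySem.Str.strip v
                  if m.contains key then m.insert key val else m
                | _ => m
              else m) md
          | none => md
        else md
      | none => md
    else md
  md.items

-- ===== PORT B =====
-- hand port of Python str.partition for a single-character separator; exact: the Bool replaces
-- the middle piece (true ↔ the separator occurs, Python's non-empty middle string)
def pvPartition1 (cs : List Char) (sep : Char) : List Char × Bool × List Char :=
  match cs with
  | [] => ([], false, [])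
  | c :: rest =>
    if c == sep then ([], true, rest)
    else
      let r := pvPartition1 rest sep
      (c :: r.1, r.2.1, r.2.2)

-- Source B's `lookup`: scan the (already reversed) header lines for the first line whose
-- partitioned key matches, return its stripped value, else the default
def pvLookupGo (revLines : List String) (key default : String) : String :=
  match revLines with
  | [] => default
  | line :: rest =>
    let p := pvPartition1 line.toList ':'
    if p.2.1 && (PySem.Str.lower (PySem.Str.strip (String.ofList p.1)) == key) then
      PySem.Str.strip (String.ofList p.2.2)
    else pvLookupGo rest key default

def extract_memory_meta_py_alt (content : String) : List (String × String) :=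
  let defaults : List (String × String) := [("name", ""), ("type", "project"), ("description", "")]
  let header : Option (List String) :=
    if PySem.Str.startswith content "---" then
      match PySem.Str.splitMax? content "---" 2 with
      | some parts =>
        if 3 ≤ parts.length then
          PySem.Str.split? (PySem.Str.strip (PySem.List.pyGetD parts 1 "")) "\n"
        else none
      | none => none
    else none
  match header with
  | none => defaults
  | some lines => defaults.map (fun kd => (kd.1, pvLookupGo lines.reverse kd.1 kd.2))

-- ===== PRECONDITION & SPEC =====
def Spec_extract_memory_meta_py (content : String) (out : List (String × String)) : Prop := out = extract_memory_meta_py_alt content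
instance (content : String) (out : List (String × String)) : Decidable (Spec_extract_memory_meta_py content out) := by unfold Spec_extract_memory_meta_py; infer_instance

-- ===== CLAIM (what is proved, stated in full; the proofs are below) =====
def Claim_equal_extract_memory_meta_py : Prop := ∀ (content : String), Dom_extract_memory_meta_py content → Spec_extract_memory_meta_py content (extract_memory_meta_py content)

-- ===== LEMMAS AND PROOFS =====

-- the three-key dict A maintains, with explicit slot values
def pvD (a b c : String) : PySem.Dict String String :=
  ⟨[("name", a), ("type", b), ("description", c)]⟩

-- A's loop body, named so the lemmas can speak about it
def pvAStep (m : PySem.Dict String String) (line : String) : PySem.Dict String String :=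
  if PySem.Str.isIn ":" line then
    match PySem.Str.splitMax? line ":" 1 with
    | some [k, v] =>
      let key := PySem.Str.lower (PySem.Str.strip k)
      let val := PySem.Str.strip v
      if m.contains key then m.insert key val else m
    | _ => m
  else m

lemma pvPartition1_found (cs : List Char) (c : Char) :
    (pvPartition1 cs c).2.1 = cs.contains c := by
  induction cs with
  | nil => simp [pvPartition1]
  | cons x rest ih =>
    by_cases h : x = c
    · simp [pvPartition1, h]
    · simp [pvPartition1, h, ih, beq_iff_eq, Ne.symm h]

lemma pvGo_zero (l cur : List Char) (acc : List (List Char)) (fuel : Nat) :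
    PySem.Chars.splitOnMax.go [':'] fuel 0 l cur acc = ((cur.reverse ++ l) :: acc).reverse := by
  cases fuel with
  | zero => simp [PySem.Chars.splitOnMax.go]
  | succ f =>
    cases l with
    | nil => simp [PySem.Chars.splitOnMax.go]
    | cons c r => simp [PySem.Chars.splitOnMax.go]

lemma pvGo_spec (cs : List Char) : ∀ (fuel : Nat) (cur : List Char) (acc : List (List Char)),
    cs.length < fuel →
    PySem.Chars.splitOnMax.go [':'] fuel 1 cs cur acc =
      acc.reverse ++ (if (pvPartition1 cs ':').2.1
        then [cur.reverse ++ (pvPartition1 cs ':').1, (pvPartition1 cs ':').2.2]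
        else [cur.reverse ++ cs]) := by
  induction cs with
  | nil =>
    intro fuel cur acc h
    match fuel, h with
    | (f + 1), _ => simp [PySem.Chars.splitOnMax.go, pvPartition1]
  | cons c rest ih =>
    intro fuel cur acc h
    match fuel, h with
    | (f + 1), h =>
      by_cases hc : c = ':'
      · subst hc
        have hpre : List.isPrefixOf [':'] (':' :: rest) = true := by
          simp [List.isPrefixOf]
        rw [show PySem.Chars.splitOnMax.go [':'] (f + 1) 1 (':' :: rest) cur acc
              = PySem.Chars.splitOnMax.go [':'] f 0 rest [] (cur.reverse :: acc) from by
            simp [PySem.Chars.splitOnMax.go, hpre]]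
        rw [pvGo_zero]
        simp [pvPartition1]
      · have hpre : List.isPrefixOf [':'] (c :: rest) = false := by
          simp [List.isPrefixOf, Ne.symm hc]
        have hlt : rest.length < f := by simpa using h
        simp only [PySem.Chars.splitOnMax.go, hpre, if_neg (by omega : ¬ (1 : Nat) = 0),
          Bool.false_eq_true, if_false]
        rw [ih f (c :: cur) acc hlt]
        by_cases hf : (pvPartition1 rest ':').2.1 <;>
          simp [pvPartition1, hc, hf, beq_iff_eq]

lemma pvSplitColon (cs : List Char) :
    PySem.Chars.splitOnMax cs [':'] 1 =
      if (pvPartition1 cs ':').2.1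
        then [(pvPartition1 cs ':').1, (pvPartition1 cs ':').2.2]
        else [cs] := by
  have := pvGo_spec cs (cs.length + 1) [] [] (by omega)
  simpa [PySem.Chars.splitOnMax] using this

lemma pvIsIn_colon (line : String) :
    PySem.Str.isIn ":" line = (pvPartition1 line.toList ':').2.1 := by
  rw [pvPartition1_found]
  have hts : (":" : String).toList = [':'] := by decide
  rw [show PySem.Str.isIn ":" line = PySem.Chars.isIn [':'] line.toList from by simp [hts]]
  by_cases h : ':' ∈ line.toList
  · have h2 : PySem.Chars.isIn [':'] line.toList = true :=
      (PySem.Chars.isIn_iff_infix _ _).mpr ((List.singleton_infix_iff _ _).mpr h)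
    simp [h2, h]
  · have h2 : PySem.Chars.isIn [':'] line.toList = false := by
      rw [PySem.Chars.isIn_eq_false_iff]
      simpa [List.singleton_infix_iff] using h
    simp [h2, h]

-- one step of A's loop on the three-slot dict, in terms of B's partition of the line
lemma pvStep (a b c : String) (line : String) :
    pvAStep (pvD a b c) line =
      let p := pvPartition1 line.toList ':'
      let key := PySem.Str.lower (PySem.Str.strip (String.ofList p.1))
      let v := PySem.Str.strip (String.ofList p.2.2)
      pvD (if p.2.1 && (key == "name") then v else a)
          (if p.2.1 && (key == "type") then v else b)
          (if p.2.1 && (key == "description") then v else c) := by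
  unfold pvAStep
  by_cases hc : (pvPartition1 line.toList ':').2.1
  · have hin : PySem.Str.isIn ":" line = true := by rw [pvIsIn_colon]; exact hc
    have hsp : PySem.Str.splitMax? line ":" 1 =
        some [String.ofList (pvPartition1 line.toList ':').1,
              String.ofList (pvPartition1 line.toList ':').2.2] := by
      simp [PySem.Str.splitMax?, PySem.Chars.splitMax?, pvSplitColon, hc]
    rw [hin]
    simp only [hsp, hc]
    set key := PySem.Str.lower (PySem.Str.strip (String.ofList (pvPartition1 line.toList ':').1))
    by_cases h1 : key = "name"
    · simp [h1, pvD, PySem.Dict.contains, PySem.Dict.insert]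
    · by_cases h2 : key = "type"
      · simp [h2, pvD, PySem.Dict.contains, PySem.Dict.insert]
      · by_cases h3 : key = "description"
        · simp [h3, pvD, PySem.Dict.contains, PySem.Dict.insert]
        · simp [pvD, PySem.Dict.contains, beq_iff_eq, Ne.symm h1, Ne.symm h2, Ne.symm h3, h1, h2, h3]
  · have hin : PySem.Str.isIn ":" line = false := by rw [pvIsIn_colon]; simpa using hc
    rw [hin]
    simp [hc]

-- A's whole loop equals three independent backwards last-occurrence searches
lemma pvFold (lines : List String) (a b c : String) :
    lines.foldl pvAStep (pvD a b c) =
      pvD (pvLookupGo lines.reverse "name" a)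
          (pvLookupGo lines.reverse "type" b)
          (pvLookupGo lines.reverse "description" c) := by
  induction lines using List.reverseRecOn with
  | nil => simp [pvLookupGo]
  | append_singleton ls x ih =>
    rw [List.foldl_append, ih, List.foldl_cons, List.foldl_nil, pvStep]
    simp only [List.reverse_append, List.reverse_cons, List.reverse_nil, List.nil_append,
      List.cons_append, pvLookupGo]

-- ===== VERDICT (by name: the statement is the Claim_ definition above) =====
theorem extract_memory_meta_py_spec : Claim_equal_extract_memory_meta_py := by
  intro content _
  unfold Spec_extract_memory_meta_py extract_memory_meta_py extract_memory_meta_py_alt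
  by_cases hs : PySem.Str.startswith content "---" = true
  · simp only [hs, if_true]
    cases hp : PySem.Str.splitMax? content "---" 2 with
    | none => rfl
    | some parts =>
      dsimp only
      by_cases hl : 3 ≤ parts.length
      · rw [if_pos hl, if_pos hl]
        cases hq : PySem.Str.split? (PySem.Str.strip (PySem.List.pyGetD parts 1 "")) "\n" with
        | none => rfl
        | some lines =>
          dsimp only
          rw [show (PySem.Dict.ofList [("name", ""), ("type", "project"), ("description", "")] :
                PySem.Dict String String) = pvD "" "project" "" from by decide]
          rw [show (fun (m : PySem.Dict String String) (line : String) =>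
                if PySem.Str.isIn ":" line then
                  match PySem.Str.splitMax? line ":" 1 with
                  | some [k, v] =>
                    let key := PySem.Str.lower (PySem.Str.strip k)
                    let val := PySem.Str.strip v
                    if m.contains key then m.insert key val else m
                  | _ => m
                else m) = pvAStep from rfl]
          rw [pvFold]
          rfl
      · rw [if_neg hl, if_neg hl]
        rfl
  · have hs' : PySem.Str.startswith content "---" = false := by simpa using hs
    simp only [hs', Bool.false_eq_true, if_false]
    rfl
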